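-- pv_equiv track=rewrite | github.com/Flouid/Project-Euler-Python | Problem68.py | order_solutions_three_gon
-- ===== SOURCE A (Python) =====
-- def order_solutions_three_gon(s1, s2, s3):
--     solution = ""
--
--     # finding the smallest out node
--     smallest_out = s1[0]
--     if s2[0] < smallest_out:
--         smallest_out = s2[0]
--     if s3[0] < smallest_out:
--         smallest_out = s3[0]
--
--     # ordering
--     if s1[0] == smallest_out:
--         for n in s1:
--             solution += str(n)
--         for n in s2:
--             solution += str(n)
--         for n in s3:
--             solution += str(n)
--     elif s2[0] == smallest_out:
--         for n in s2:
--             solution += str(n)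
--         for n in s3:
--             solution += str(n)
--         for n in s1:
--             solution += str(n)
--     else:
--         for n in s3:
--             solution += str(n)
--         for n in s1:
--             solution += str(n)
--         for n in s2:
--             solution += str(n)
--
--     return solution
-- ===== SOURCE B (Python) =====
-- def order_solutions_three_gon(s1, s2, s3):
--     # Build the whole digit string once, then rotate it at a character offset:
--     # the offset of the list with the smallest first element (ties -> earliest
--     # list, enforced by the lexicographic min over (value, offset) pairs,
--     # since the offsets are strictly increasing).
--     parts = [''.join(str(n) for n in l) for l in (s1, s2, s3)]
--     full = ''.join(parts)
--     cuts = [0, len(parts[0]), len(parts[0]) + len(parts[1])]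
--     _, cut = min(zip((s1[0], s2[0], s3[0]), cuts))
--     return full[cut:] + full[:cut]
-- ===== Notes on version B (the rewrite author's own statement) =====
-- stated objective: alternative
-- what changed: Instead of scanning for the smallest first element and concatenating the three lists in one of three explicit branch orders, B builds the whole digit string once, computes a character cut offset as the lexicographic min over (first-element, offset) pairs, and returns the string rotated at that offset.
import Mathlib
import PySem

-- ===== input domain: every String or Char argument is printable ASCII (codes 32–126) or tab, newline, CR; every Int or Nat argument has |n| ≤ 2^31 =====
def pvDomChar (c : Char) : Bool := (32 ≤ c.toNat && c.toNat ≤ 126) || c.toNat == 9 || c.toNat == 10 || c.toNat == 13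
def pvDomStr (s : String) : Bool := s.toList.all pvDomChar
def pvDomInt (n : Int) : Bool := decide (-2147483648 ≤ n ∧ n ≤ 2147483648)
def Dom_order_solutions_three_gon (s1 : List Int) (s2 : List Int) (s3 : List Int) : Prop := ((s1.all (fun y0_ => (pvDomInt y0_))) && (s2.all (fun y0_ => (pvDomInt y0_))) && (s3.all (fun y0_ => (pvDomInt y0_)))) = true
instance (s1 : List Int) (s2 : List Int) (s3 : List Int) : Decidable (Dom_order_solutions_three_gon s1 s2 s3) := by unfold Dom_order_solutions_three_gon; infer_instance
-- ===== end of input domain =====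

-- B builds the whole digit string once and returns it rotated at a character
-- offset picked by a lexicographic min over (first-element, offset) pairs,
-- instead of A's smallest-value scan and three concatenation branches (objective: alternative).

-- ===== PORT A =====
-- 'solution += str(n)' over a list
def pvCat (acc : String) (l : List Int) : String :=
  l.foldl (fun s n => s ++ PySem.Int.toStr n) acc

def order_solutions_three_gon (s1 : List Int) (s2 : List Int) (s3 : List Int) : String :=
  -- s1[0] etc.; Pre_ guarantees nonemptiness (Python raises IndexError otherwise)
  let smallest0 := s1.headD 0
  let smallest1 := if s2.headD 0 < smallest0 then s2.headD 0 else smallest0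
  let smallest := if s3.headD 0 < smallest1 then s3.headD 0 else smallest1
  if s1.headD 0 == smallest then pvCat (pvCat (pvCat "" s1) s2) s3
  else if s2.headD 0 == smallest then pvCat (pvCat (pvCat "" s2) s3) s1
  else pvCat (pvCat (pvCat "" s3) s1) s2

-- ===== PORT B =====
-- ''.join(str(n) for n in l), on code points
def pvSegB (l : List Int) : List Char := (l.map PySem.Int.toChars).flatten

-- Python's two-argument tuple min: lexicographic, the FIRST minimum is kept
-- (exact hand port of min() tuple comparison on (int, int) pairs)
def pvLexMin2 (a b : Int × Nat) : Int × Nat :=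
  if b.1 < a.1 ∨ (b.1 = a.1 ∧ b.2 < a.2) then b else a

def order_solutions_three_gon_alt (s1 : List Int) (s2 : List Int) (s3 : List Int) : String :=
  let parts : List (List Char) := [s1, s2, s3].map pvSegB   -- [''.join(...) for l in (s1,s2,s3)]
  let full : List Char := parts.flatten                     -- ''.join(parts)
  let cuts : List Nat :=
    [0, (parts.getD 0 []).length, (parts.getD 0 []).length + (parts.getD 1 []).length]
  -- s1[0], s2[0], s3[0]: Pre_ guarantees the lists are nonempty
  let pairs : List (Int × Nat) := List.zip [s1.headD 0, s2.headD 0, s3.headD 0] cuts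
  -- min(zip(...)): fold of the tuple min over the tail, the head as start value
  let cut : Nat := (match pairs with | [] => (0, 0) | p :: ps => ps.foldl pvLexMin2 p).2
  -- full[cut:] + full[:cut]
  String.ofList (PySem.List.slice full (some (cut : Int)) none ++
                 PySem.List.slice full none (some (cut : Int)))

-- ===== PRECONDITION & SPEC =====
-- A reads s1[0], s2[0], s3[0] unconditionally, raising IndexError on an empty list;
-- Pre_ excludes exactly those inputs.
def Pre_order_solutions_three_gon (s1 : List Int) (s2 : List Int) (s3 : List Int) : Prop :=
  s1 ≠ [] ∧ s2 ≠ [] ∧ s3 ≠ []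
instance (s1 : List Int) (s2 : List Int) (s3 : List Int) : Decidable (Pre_order_solutions_three_gon s1 s2 s3) := by
  unfold Pre_order_solutions_three_gon; infer_instance

def pvWitness_order_solutions_three_gon : List Int × List Int × List Int :=
  ([2, 1, 3], [4, 3, 5], [6, 5, 1])

def Spec_order_solutions_three_gon (s1 : List Int) (s2 : List Int) (s3 : List Int) (out : String) : Prop := out = order_solutions_three_gon_alt s1 s2 s3
instance (s1 : List Int) (s2 : List Int) (s3 : List Int) (out : String) : Decidable (Spec_order_solutions_three_gon s1 s2 s3 out) := by unfold Spec_order_solutions_three_gon; infer_instance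

-- ===== CLAIM (what is proved, stated in full; the proofs are below) =====
def Claim_equal_order_solutions_three_gon : Prop := ∀ (s1 : List Int) (s2 : List Int) (s3 : List Int), Dom_order_solutions_three_gon s1 s2 s3 → Pre_order_solutions_three_gon s1 s2 s3 → Spec_order_solutions_three_gon s1 s2 s3 (order_solutions_three_gon s1 s2 s3)

-- ===== LEMMAS AND PROOFS =====
-- the string contributed by one list on the A side
def pvSeg (l : List Int) : String := String.join (l.map PySem.Int.toStr)

theorem pvFoldAppend (acc : String) (ls : List String) :
    ls.foldl (fun r s => r ++ s) acc = acc ++ ls.foldl (fun r s => r ++ s) "" := by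
  induction ls generalizing acc with
  | nil => simp
  | cons x xs ih =>
      simp only [List.foldl]
      rw [ih, ih ("" ++ x)]
      simp [String.append_assoc]

theorem pvCat_eq (acc : String) (l : List Int) : pvCat acc l = acc ++ pvSeg l := by
  induction l generalizing acc with
  | nil => simp [pvCat, pvSeg, String.join]
  | cons x xs ih =>
      simp only [pvCat, pvSeg, List.foldl, List.map, String.join] at *
      rw [ih, pvFoldAppend ("" ++ PySem.Int.toStr x)]
      simp [String.append_assoc]

theorem pvSeg_toList (l : List Int) : (pvSeg l).toList = pvSegB l := by
  simp [pvSeg, pvSegB, String.toList_join, List.map_map, Function.comp_def,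
        PySem.Int.toList_toStr]

-- A = (the three-way branch over segments); proved by unfolding A
theorem a_eq (s1 s2 s3 : List Int) :
    order_solutions_three_gon s1 s2 s3 =
      (if s2.headD 0 < s1.headD 0 then
        (if s3.headD 0 < s2.headD 0 then
          pvSeg s3 ++ (pvSeg s1 ++ pvSeg s2) else pvSeg s2 ++ (pvSeg s3 ++ pvSeg s1))
      else
        (if s3.headD 0 < s1.headD 0 then
          pvSeg s3 ++ (pvSeg s1 ++ pvSeg s2) else pvSeg s1 ++ (pvSeg s2 ++ pvSeg s3))) := by
  simp only [order_solutions_three_gon, pvCat_eq, beq_iff_eq]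
  split_ifs <;> first
    | (exfalso; omega)
    | simp [String.append_assoc]

-- B = (the same three-way branch); proved by evaluating the fold and the slices
theorem pvTake2 (a b c : List Char) :
    (a ++ (b ++ c)).take (a.length + b.length) = a ++ b := by
  rw [← List.append_assoc, ← List.length_append, List.take_left]
theorem b_eq (s1 s2 s3 : List Int) :
    order_solutions_three_gon_alt s1 s2 s3 =
      (if s2.headD 0 < s1.headD 0 then
        (if s3.headD 0 < s2.headD 0 then
          pvSeg s3 ++ (pvSeg s1 ++ pvSeg s2) else pvSeg s2 ++ (pvSeg s3 ++ pvSeg s1))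
      else
        (if s3.headD 0 < s1.headD 0 then
          pvSeg s3 ++ (pvSeg s1 ++ pvSeg s2) else pvSeg s1 ++ (pvSeg s2 ++ pvSeg s3))) := by
  simp only [order_solutions_three_gon_alt, List.map, List.flatten, List.getD, List.zip, List.zipWith, List.foldl,
             List.getElem?_cons_zero, List.getElem?_cons_succ, Option.getD_some, pvLexMin2,
             Nat.not_lt_zero, and_false, or_false]
  by_cases h1 : s2.headD 0 < s1.headD 0
  · have h1' : ¬ (s2.headD 0 = s1.headD 0) := by omega
    simp only [h1, if_true]
    by_cases h2 : s3.headD 0 < s2.headD 0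
    · have hno : ¬ ((pvSegB s1).length + (pvSegB s2).length < (pvSegB s1).length) := by omega
      simp only [h2, hno, and_false, or_false, if_true]
      refine String.toList_inj.mp ?_
      simp only [List.append_eq, List.append_nil]
      rw [PySem.List.slice_from_natCast, PySem.List.slice_to_natCast]
      simp [String.toList_append, pvSeg_toList, pvTake2]
    · have hno : ¬ ((pvSegB s1).length + (pvSegB s2).length < (pvSegB s1).length) := by omega
      simp only [h2, hno, and_false, or_false, if_false]
      refine String.toList_inj.mp ?_
      simp [String.toList_append, pvSeg_toList, PySem.List.slice_from_natCast,
            PySem.List.slice_to_natCast]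
  · simp only [h1, if_false]
    by_cases h2 : s3.headD 0 < s1.headD 0
    · simp only [h2, true_or, if_true]
      refine String.toList_inj.mp ?_
      simp only [List.append_eq, List.append_nil]
      rw [PySem.List.slice_from_natCast, PySem.List.slice_to_natCast]
      simp [String.toList_append, pvSeg_toList, pvTake2]
    · simp only [h2, false_or]
      have hno : ¬ ((pvSegB s1).length + (pvSegB s2).length < 0) := by omega
      simp only [hno, and_false, if_false]
      refine String.toList_inj.mp ?_
      simp only [List.append_eq, List.append_nil]
      rw [PySem.List.slice_from_natCast, PySem.List.slice_to_natCast]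
      simp [String.toList_append, pvSeg_toList]

theorem order_solutions_three_gon_spec' (s1 s2 s3 : List Int) :
    order_solutions_three_gon s1 s2 s3 = order_solutions_three_gon_alt s1 s2 s3 := by
  rw [a_eq, b_eq]

-- ===== VERDICT (by name: the statement is the Claim_ definition above) =====
theorem order_solutions_three_gon_spec : Claim_equal_order_solutions_three_gon := by
  intro s1 s2 s3 _ _
  exact order_solutions_three_gon_spec' s1 s2 s3
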